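-- pv_equiv track=rewrite | github.com/kkutt/codejam | codejam_2017/round_1b/stableneighbors/StableNeighBors.py | are_equal
-- ===== SOURCE A (Python) =====
-- def are_equal(elem1, elem2):
--     if elem1 == elem2:
--         return True
--     if elem1 in ["O", "G", "V"] and elem2 in ["O", "G", "V"]:
--         return True
--     elems = []
--     for elem_ in [elem1, elem2]:
--         if elem_ == "O":
--             elems.append("R")
--             elems.append("Y")
--         elif elem_ == "G":
--             elems.append("B")
--             elems.append("Y")
--         elif elem_ == "V":
--             elems.append("B")
--             elems.append("R")
--         else:
--             elems.append(elem_)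
--
--     elems.sort()
--     for i in range(1, len(elems)):
--         if elems[i-1] == elems[i]:
--             return True
--     return False
-- ===== SOURCE B (Python) =====
-- # Table-driven: besides identical tokens, exactly nine unordered pairs of tokens
-- # conflict (secondary-secondary and secondary-with-its-primary); look the pair up.
-- _CONFLICTS = frozenset([
--     ("O", "G"), ("O", "V"), ("G", "V"),
--     ("O", "R"), ("O", "Y"),
--     ("G", "B"), ("G", "Y"),
--     ("V", "B"), ("V", "R"),
-- ])
--
--
-- def are_equal(elem1, elem2):
--     return elem1 == elem2 or (elem1, elem2) in _CONFLICTS or (elem2, elem1) in _CONFLICTS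
-- ===== Notes on version B (the rewrite author's own statement) =====
-- stated objective: simpler
-- what changed: Replaces A's expand-to-primaries list building, sort and adjacent-duplicate scan with a precomputed 9-entry conflict-pair table: return elem1 == elem2 or an (unordered) pair lookup in the table.
import Mathlib
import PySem

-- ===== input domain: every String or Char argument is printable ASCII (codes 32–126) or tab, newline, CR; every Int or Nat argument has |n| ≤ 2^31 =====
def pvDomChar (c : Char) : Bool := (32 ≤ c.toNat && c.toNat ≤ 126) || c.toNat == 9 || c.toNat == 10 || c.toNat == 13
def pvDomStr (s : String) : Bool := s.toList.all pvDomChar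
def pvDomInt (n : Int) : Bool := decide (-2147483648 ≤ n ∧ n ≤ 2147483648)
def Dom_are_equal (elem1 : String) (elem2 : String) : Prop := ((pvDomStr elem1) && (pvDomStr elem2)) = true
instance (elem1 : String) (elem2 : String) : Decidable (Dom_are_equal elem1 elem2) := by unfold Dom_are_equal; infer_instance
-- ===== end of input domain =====

-- B replaces A's expand-to-primaries list, sort and adjacent-duplicate scan by an equality test plus a lookup in a fixed 9-entry conflict-pair table (simpler; same cost on these tiny inputs).

-- ===== PORT A =====
-- loop body: append the expansion of elem_ to elems
def pvExpandStep (elems : List String) (elem_ : String) : List String :=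
  if elem_ == "O" then (elems ++ ["R"]) ++ ["Y"]
  else if elem_ == "G" then (elems ++ ["B"]) ++ ["Y"]
  else if elem_ == "V" then (elems ++ ["B"]) ++ ["R"]
  else elems ++ [elem_]

-- 'for i in range(1, len(elems)): if elems[i-1] == elems[i]: return True' / 'return False'
def pvAdjScan : List String → Bool
  | a :: b :: rest => if a == b then true else pvAdjScan (b :: rest)
  | _ => false

def are_equal (elem1 : String) (elem2 : String) : Bool :=
  if elem1 == elem2 then true
  else if ["O", "G", "V"].contains elem1 && ["O", "G", "V"].contains elem2 then true
  else
    let elems := [elem1, elem2].foldl pvExpandStep []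
    pvAdjScan (PySem.List.sorted elems (fun x => x) false)

-- ===== PORT B =====
def pvConflictTable : List (String × String) :=
  [("O", "G"), ("O", "V"), ("G", "V"),
   ("O", "R"), ("O", "Y"),
   ("G", "B"), ("G", "Y"),
   ("V", "B"), ("V", "R")]

def are_equal_alt (elem1 : String) (elem2 : String) : Bool :=
  elem1 == elem2 || pvConflictTable.contains (elem1, elem2) || pvConflictTable.contains (elem2, elem1)

-- ===== PRECONDITION & SPEC =====
def Spec_are_equal (elem1 : String) (elem2 : String) (out : Bool) : Prop := out = are_equal_alt elem1 elem2
instance (elem1 : String) (elem2 : String) (out : Bool) : Decidable (Spec_are_equal elem1 elem2 out) := by unfold Spec_are_equal; infer_instance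

-- ===== CLAIM (what is proved, stated in full; the proofs are below) =====
def Claim_equal_are_equal : Prop := ∀ (elem1 : String) (elem2 : String), Dom_are_equal elem1 elem2 → Spec_are_equal elem1 elem2 (are_equal elem1 elem2)

-- ===== LEMMAS AND PROOFS =====

-- the color expansion of one token, for the proof only
def pvColors (e : String) : List String :=
  if e == "O" then ["R", "Y"]
  else if e == "G" then ["B", "Y"]
  else if e == "V" then ["B", "R"]
  else [e]

theorem pvExpandStep_eq (acc : List String) (e : String) :
    pvExpandStep acc e = acc ++ pvColors e := by
  unfold pvExpandStep pvColors
  split_ifs <;> simp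

theorem pvColors_nodup (e : String) : (pvColors e).Nodup := by
  unfold pvColors; split_ifs <;> simp

theorem pvColors_ne_nil (e : String) : pvColors e ≠ [] := by
  unfold pvColors; split_ifs <;> simp

-- the adjacent-duplicate scan on a (≤)-sorted list detects exactly "not Nodup"
theorem pvAdjScan_iff (l : List String) (hp : l.Pairwise (· ≤ ·)) :
    pvAdjScan l = true ↔ ¬ l.Nodup := by
  induction l with
  | nil => simp [pvAdjScan]
  | cons a t ih =>
    cases t with
    | nil => simp [pvAdjScan]
    | cons b r =>
      rcases List.pairwise_cons.mp hp with ⟨hab, hbr⟩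
      by_cases h : a = b
      · subst h
        simp [pvAdjScan, List.nodup_cons]
      · have hscan : pvAdjScan (a :: b :: r) = pvAdjScan (b :: r) := by
          simp [pvAdjScan, h]
        rw [hscan, ih hbr]
        constructor
        · intro hnd hall
          exact hnd (List.Nodup.of_cons hall)
        · intro hnd hall
          apply hnd
          refine List.nodup_cons.mpr ⟨?_, hall⟩
          intro hmem
          rcases List.mem_cons.mp hmem with h1 | h1
          · exact h (h1.symm ▸ rfl)
          · have hba : b ≤ a := by
              rcases List.pairwise_cons.mp hbr with ⟨hb, _⟩
              exact hb a h1
            have hab' : a ≤ b := hab b (List.mem_cons_self)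
            exact h (le_antisymm hab' hba)

-- A returns true exactly when the two tokens share a primary color
theorem a_true_iff (e1 e2 : String) :
    are_equal e1 e2 = true ↔ ∃ x, x ∈ pvColors e1 ∧ x ∈ pvColors e2 := by
  unfold are_equal
  by_cases h12 : e1 = e2
  · subst h12
    simp only [BEq.rfl, if_true, true_iff]
    rcases List.exists_mem_of_ne_nil _ (pvColors_ne_nil e1) with ⟨x, hx⟩
    exact ⟨x, hx, hx⟩
  · have hne : (e1 == e2) = false := by simp [h12]
    rw [hne]
    simp only [Bool.false_eq_true, if_false]
    by_cases hogv : (["O", "G", "V"].contains e1 && ["O", "G", "V"].contains e2) = true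
    · rw [hogv]
      simp only [if_true, true_iff]
      rw [Bool.and_eq_true] at hogv
      have h1 : e1 = "O" ∨ e1 = "G" ∨ e1 = "V" := by
        simpa using List.contains_iff_mem.mp hogv.1
      have h2 : e2 = "O" ∨ e2 = "G" ∨ e2 = "V" := by
        simpa using List.contains_iff_mem.mp hogv.2
      rcases h1 with h1 | h1 | h1 <;> rcases h2 with h2 | h2 | h2 <;> subst h1 <;> subst h2 <;>
        first
        | exact absurd rfl h12
        | exact ⟨"Y", by decide, by decide⟩
        | exact ⟨"R", by decide, by decide⟩
        | exact ⟨"B", by decide, by decide⟩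
    · rw [Bool.not_eq_true] at hogv
      rw [hogv]
      simp only [Bool.false_eq_true, if_false]
      have hfold : [e1, e2].foldl pvExpandStep [] = pvColors e1 ++ pvColors e2 := by
        simp [List.foldl, pvExpandStep_eq]
      rw [hfold]
      set l := pvColors e1 ++ pvColors e2 with hl
      have hperm : (PySem.List.sorted l (fun x => x) false).Perm l :=
        PySem.List.sorted_perm l _ false
      rw [pvAdjScan_iff _ (by simpa using PySem.List.sorted_pairwise l (fun x => x))]
      rw [hperm.nodup_iff, hl, List.nodup_append]
      constructor
      · intro hnd
        by_contra hno
        apply hnd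
        refine ⟨pvColors_nodup e1, pvColors_nodup e2, ?_⟩
        intro a ha b hb heq
        exact hno ⟨a, ha, heq ▸ hb⟩
      · rintro ⟨x, hx1, hx2⟩ ⟨_, _, hdisj⟩
        exact hdisj x hx1 x hx2 rfl

-- B returns true exactly on equality or a (either-orientation) table hit
theorem b_true_iff (e1 e2 : String) :
    are_equal_alt e1 e2 = true ↔
      e1 = e2 ∨ (e1, e2) ∈ pvConflictTable ∨ (e2, e1) ∈ pvConflictTable := by
  unfold are_equal_alt
  simp
  tauto

-- the bridge: the table hits exactly the distinct color-sharing pairs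
theorem bridge (e1 e2 : String) :
    (∃ x, x ∈ pvColors e1 ∧ x ∈ pvColors e2) ↔
      e1 = e2 ∨ (e1, e2) ∈ pvConflictTable ∨ (e2, e1) ∈ pvConflictTable := by
  by_cases h1 : e1 = "O" ∨ e1 = "G" ∨ e1 = "V" <;>
    by_cases h2 : e2 = "O" ∨ e2 = "G" ∨ e2 = "V"
  · rcases h1 with h1 | h1 | h1 <;> rcases h2 with h2 | h2 | h2 <;> subst h1 <;> subst h2 <;> decide
  · push_neg at h2
    rcases h1 with h1 | h1 | h1 <;> subst h1 <;>
      simp [pvColors, pvConflictTable, h2.1, h2.2.1, h2.2.2,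
        Ne.symm h2.1, Ne.symm h2.2.1, Ne.symm h2.2.2, Prod.ext_iff] <;> tauto
  · push_neg at h1
    rcases h2 with h2 | h2 | h2 <;> subst h2 <;>
      simp [pvColors, pvConflictTable, h1.1, h1.2.1, h1.2.2, Prod.ext_iff] <;> tauto
  · push_neg at h1; push_neg at h2
    have c1 : pvColors e1 = [e1] := by simp [pvColors, h1.1, h1.2.1, h1.2.2]
    have c2 : pvColors e2 = [e2] := by simp [pvColors, h2.1, h2.2.1, h2.2.2]
    rw [c1, c2]
    constructor
    · rintro ⟨x, hx1, hx2⟩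
      simp at hx1 hx2
      exact Or.inl (hx1 ▸ hx2 ▸ rfl)
    · rintro (h | h | h)
      · exact ⟨e1, by simp, by simp [h]⟩
      · exact absurd h (by simp [pvConflictTable, Prod.ext_iff, h1.1, h1.2.1, h1.2.2])
      · exact absurd h (by simp [pvConflictTable, Prod.ext_iff, h2.1, h2.2.1, h2.2.2])

-- ===== VERDICT (by name: the statement is the Claim_ definition above) =====
theorem are_equal_spec : Claim_equal_are_equal := by
  intro e1 e2 _
  unfold Spec_are_equal
  rw [Bool.eq_iff_iff, a_true_iff, b_true_iff]
  exact bridge e1 e2
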